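-- pv_equiv track=rewrite | github.com/vasile-draguta/gomoku | game_service/game_services.py | check_for_five_consecutive_symbols
-- ===== SOURCE A (Python) =====
-- def check_for_five_consecutive_symbols(line, symbol):
--     """
--     Checks if a line contains 5 consecutive symbols
--     :param line: line to be checked
--     :param symbol: symbol to be checked
--     :return: True if the line contains 5 consecutive symbols, False otherwise
--     """
--     symbol_count = 0
--     for cell in line:
--         if cell == symbol:
--             symbol_count += 1
--             if symbol_count == 5:
--                 return True
--         else:
--             symbol_count = 0
--     return False
-- ===== SOURCE B (Python) =====
-- def check_for_five_consecutive_symbols(line, symbol):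
--     """Segment the line into maximal runs of equal adjacent cells, then
--     test whether some run of the symbol has length >= 5."""
--     runs = []
--     i = 0
--     n = len(line)
--     while i < n:
--         j = i
--         while j < n and line[j] == line[i]:
--             j += 1
--         runs.append((line[i], j - i))
--         i = j
--     return any(key == symbol and length >= 5 for key, length in runs)
-- ===== Notes on version B (the rewrite author's own statement) =====
-- stated objective: alternative
-- what changed: Replaces the running-counter-with-reset single pass by a two-phase run-length encoding: segment the line into maximal runs of equal adjacent cells, then test whether any run keyed by the symbol has length >= 5.
import Mathlib
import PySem

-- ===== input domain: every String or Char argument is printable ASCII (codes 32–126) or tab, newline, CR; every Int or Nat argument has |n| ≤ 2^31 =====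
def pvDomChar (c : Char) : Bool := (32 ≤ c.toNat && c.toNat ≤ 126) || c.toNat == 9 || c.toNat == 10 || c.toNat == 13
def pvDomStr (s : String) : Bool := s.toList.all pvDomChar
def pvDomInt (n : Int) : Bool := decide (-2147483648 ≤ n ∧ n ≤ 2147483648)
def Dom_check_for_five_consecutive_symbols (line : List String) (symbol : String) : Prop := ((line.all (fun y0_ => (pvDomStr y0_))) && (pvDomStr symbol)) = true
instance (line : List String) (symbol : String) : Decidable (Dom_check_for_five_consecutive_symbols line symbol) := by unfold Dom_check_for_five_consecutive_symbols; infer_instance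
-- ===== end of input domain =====

-- B replaces A's running-counter single pass by run-length encoding followed by a run test; same cost, different decomposition.

-- ===== PORT A =====
-- the for-loop with its symbol_count accumulator and early return
def pvGoA (symbol : String) : List String → Nat → Bool
  | [], _ => false
  | cell :: rest, symbol_count =>
    if cell = symbol then
      if symbol_count + 1 = 5 then true
      else pvGoA symbol rest (symbol_count + 1)
    else pvGoA symbol rest 0

def check_for_five_consecutive_symbols (line : List String) (symbol : String) : Bool :=
  pvGoA symbol line 0

-- ===== PORT B =====
-- phase 1 of Source B: segment the list into maximal runs of equal adjacent cells, as (key, length) pairs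
def pvRuns : List String → List (String × Nat)
  | [] => []
  | x :: xs =>
    (x, (xs.takeWhile (fun y => y = x)).length + 1) :: pvRuns (xs.dropWhile (fun y => y = x))
termination_by l => l.length
decreasing_by
  simp only [List.length_cons]
  exact Nat.lt_succ_of_le (List.length_dropWhile_le _ _)

-- phase 2 of Source B: any run keyed by the symbol with length ≥ 5
def check_for_five_consecutive_symbols_alt (line : List String) (symbol : String) : Bool :=
  (pvRuns line).any (fun p => p.1 = symbol && decide (5 ≤ p.2))

-- ===== PRECONDITION & SPEC =====
def Spec_check_for_five_consecutive_symbols (line : List String) (symbol : String) (out : Bool) : Prop := out = check_for_five_consecutive_symbols_alt line symbol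
instance (line : List String) (symbol : String) (out : Bool) : Decidable (Spec_check_for_five_consecutive_symbols line symbol out) := by unfold Spec_check_for_five_consecutive_symbols; infer_instance

-- ===== CLAIM (what is proved, stated in full; the proofs are below) =====
def Claim_equal_check_for_five_consecutive_symbols : Prop := ∀ (line : List String) (symbol : String), Dom_check_for_five_consecutive_symbols line symbol → Spec_check_for_five_consecutive_symbols line symbol (check_for_five_consecutive_symbols line symbol)

-- ===== LEMMAS AND PROOFS =====

-- skipping a block of non-symbol cells resets nothing: A's loop from count 0 ignores it
theorem pvGoA_skip (symbol : String) (t rest : List String)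
    (h : ∀ y ∈ t, y ≠ symbol) :
    pvGoA symbol (t ++ rest) 0 = pvGoA symbol rest 0 := by
  induction t with
  | nil => rfl
  | cons a t ih =>
    have ha : a ≠ symbol := h a (by simp)
    simp only [List.cons_append, pvGoA, if_neg ha]
    exact ih (fun y hy => h y (by simp [hy]))

-- A's loop across a block of symbol cells: the counter just adds the block length
theorem pvGoA_run (symbol : String) (u rest : List String) (cnt : Nat)
    (hc : cnt < 5) (h : ∀ y ∈ u, y = symbol) :
    pvGoA symbol (u ++ rest) cnt =
      if 5 ≤ cnt + u.length then true else pvGoA symbol rest (cnt + u.length) := by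
  induction u generalizing cnt with
  | nil => simp [Nat.not_le.mpr hc]
  | cons a u ih =>
    have ha : a = symbol := h a (by simp)
    simp only [List.cons_append, pvGoA, if_pos ha]
    by_cases h5 : cnt + 1 = 5
    · have hge : 5 ≤ cnt + (a :: u).length := by simp only [List.length_cons]; omega
      rw [if_pos h5, if_pos hge]
    · have hc' : cnt + 1 < 5 := by omega
      rw [if_neg h5, ih (cnt + 1) hc' (fun y hy => h y (List.mem_cons_of_mem a hy))]
      have harith : cnt + 1 + u.length = cnt + (a :: u).length := by
        simp only [List.length_cons]; omega
      rw [harith]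

-- restarting A's loop at the boundary after a symbol run: the head of dropWhile fails the predicate,
-- so the counter's value there does not matter
theorem pvGoA_reset (symbol x : String) (xs : List String) (hx : x = symbol) (cnt : Nat) :
    pvGoA symbol (xs.dropWhile (fun y => y = x)) cnt
      = pvGoA symbol (xs.dropWhile (fun y => y = x)) 0 := by
  rcases hr : xs.dropWhile (fun y => y = x) with _ | ⟨h, t⟩
  · rfl
  · have hh : ¬ (h = x) := by
      have := List.head?_dropWhile_not (fun y => decide (y = x)) xs
      simp [hr] at this
      simpa using this
    have hh' : h ≠ symbol := by rw [hx] at hh; exact hh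
    simp [pvGoA, if_neg hh']

theorem pv_main (symbol : String) (line : List String) :
    pvGoA symbol line 0 = check_for_five_consecutive_symbols_alt line symbol := by
  induction line using pvRuns.induct with
  | case1 => simp [check_for_five_consecutive_symbols_alt, pvRuns, pvGoA]
  | case2 x xs ih =>
    have hsplit : x :: xs
        = (x :: xs.takeWhile (fun y => y = x)) ++ xs.dropWhile (fun y => y = x) := by
      simp [List.takeWhile_append_dropWhile]
    unfold check_for_five_consecutive_symbols_alt at ih ⊢
    rw [pvRuns, List.any_cons]
    by_cases hx : x = symbol
    · subst hx
      have hall : ∀ y ∈ x :: xs.takeWhile (fun y => y = x), y = x := by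
        intro y hy
        rcases List.mem_cons.mp hy with h | h
        · exact h
        · have := List.mem_takeWhile_imp h
          simpa using this
      rw [hsplit, pvGoA_run x _ _ 0 (by omega) hall]
      by_cases h5 : 5 ≤ (xs.takeWhile (fun y => y = x)).length + 1
      · have h5' : 5 ≤ 0 + (x :: xs.takeWhile (fun y => y = x)).length := by
          simp only [List.length_cons]; omega
        rw [if_pos h5']
        simp [h5]
      · have h5' : ¬ 5 ≤ 0 + (x :: xs.takeWhile (fun y => y = x)).length := by
          simp only [List.length_cons]; omega
        rw [if_neg h5']
        rw [pvGoA_reset x x xs rfl, ih]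
        simp [h5]
    · have hall : ∀ y ∈ x :: xs.takeWhile (fun y => y = x), y ≠ symbol := by
        intro y hy
        rcases List.mem_cons.mp hy with h | h
        · simpa [h] using hx
        · have hyx : y = x := by
            have := List.mem_takeWhile_imp h
            simpa using this
          simpa [hyx] using hx
      rw [hsplit, pvGoA_skip symbol _ _ hall, ih]
      simp [hx]

-- ===== VERDICT (by name: the statement is the Claim_ definition above) =====
theorem check_for_five_consecutive_symbols_spec : Claim_equal_check_for_five_consecutive_symbols := by
  intro line symbol _
  exact pv_main symbol line
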